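-- pv_equiv track=rewrite | github.com/viggo-gascou/EuroEval | src/scripts/create_kpwr_ner.py | create_label_mapping
-- ===== SOURCE A (Python) =====
-- def create_label_mapping(label_names: list[str]) -> dict[int, str]:
--     """Create mapping from KPWr labels to standard BIO labels.
--
--     Args:
--         label_names: The list of label names.
--
--     Returns:
--         The mapping from KPWr labels to standard BIO labels.
--     """
--     mapping: dict[int, str] = {}
--
--     for i, label_name in enumerate(label_names):
--         if label_name == "O":
--             mapping[i] = "O"
--         elif "nam_liv" in label_name:
--             # Living beings (persons, characters, etc.)
--             if label_name.startswith("B-"):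
--                 mapping[i] = "B-PER"
--             elif label_name.startswith("I-"):
--                 mapping[i] = "I-PER"
--         elif "nam_loc" in label_name:
--             # Locations (cities, countries, etc.)
--             if label_name.startswith("B-"):
--                 mapping[i] = "B-LOC"
--             elif label_name.startswith("I-"):
--                 mapping[i] = "I-LOC"
--         elif "nam_org" in label_name:
--             # Organizations (companies, institutions, etc.)
--             if label_name.startswith("B-"):
--                 mapping[i] = "B-ORG"
--             elif label_name.startswith("I-"):
--                 mapping[i] = "I-ORG"
--         else:
--             # Everything else (events, products, etc.)
--             if label_name.startswith("B-"):
--                 mapping[i] = "B-MISC"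
--             elif label_name.startswith("I-"):
--                 mapping[i] = "I-MISC"
--             else:
--                 mapping[i] = "O"  # Fallback
--
--     return mapping
-- ===== SOURCE B (Python) =====
-- _STAGES = [("nam_liv", "PER"), ("nam_loc", "LOC"), ("nam_org", "ORG")]
--
--
-- def create_label_mapping(label_names):
--     """Staged version: partition the labels stage by stage, collecting the
--     (index, tag) entries each stage produces, then rebuild the dict in
--     index order at the end."""
--     entries = []
--     pending = list(enumerate(label_names))
--
--     # stage 1: the literal "O" label
--     entries += [(i, "O") for i, n in pending if n == "O"]
--     pending = [(i, n) for i, n in pending if n != "O"]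
--
--     # one stage per known category, in priority order
--     for frag, tag in _STAGES:
--         claimed = [(i, n) for i, n in pending if frag in n]
--         pending = [(i, n) for i, n in pending if frag not in n]
--         entries += [(i, ("B-" if n.startswith("B-") else "I-") + tag)
--                     for i, n in claimed
--                     if n.startswith("B-") or n.startswith("I-")]
--
--     # final stage: everything no category claimed
--     entries += [(i, "B-MISC" if n.startswith("B-") else
--                     "I-MISC" if n.startswith("I-") else "O")
--                 for i, n in pending]
--
--     return dict(sorted(entries, key=lambda e: e[0]))
-- ===== Notes on version B (the rewrite author's own statement) =====
-- stated objective: alternative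
-- what changed: Replaces A's single pass with a nested per-element decision tree by staged partitioning passes: each stage (literal O, each category in priority order, fallback) claims its labels from a shrinking pending worklist and emits its entries, and the dict is rebuilt at the end by sorting the collected entries by index.
import Mathlib
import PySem

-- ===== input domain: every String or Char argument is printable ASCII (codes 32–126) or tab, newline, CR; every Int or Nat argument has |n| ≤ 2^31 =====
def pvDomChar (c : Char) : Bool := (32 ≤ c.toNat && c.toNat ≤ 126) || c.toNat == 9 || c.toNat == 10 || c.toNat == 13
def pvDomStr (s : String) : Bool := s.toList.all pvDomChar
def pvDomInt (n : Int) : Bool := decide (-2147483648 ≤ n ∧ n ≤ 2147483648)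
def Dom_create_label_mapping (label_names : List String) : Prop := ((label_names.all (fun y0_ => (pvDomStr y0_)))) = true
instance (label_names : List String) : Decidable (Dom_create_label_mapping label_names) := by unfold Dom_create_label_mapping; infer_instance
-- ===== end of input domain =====

-- B replaces A's single-pass per-element decision tree by staged partitioning passes over a
-- shrinking worklist, rebuilding the dict by sorting the collected entries; same return value.

-- ===== PORT A =====
def create_label_mapping (label_names : List String) : List (Int × String) :=
  let mapping : PySem.Dict Int String :=
    (PySem.List.enumerate label_names).foldl (fun mapping p =>
      let i := p.1
      let label_name := p.2
      if label_name = "O" then mapping.insert i "O"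
      else if PySem.Str.isIn "nam_liv" label_name then
        (if PySem.Str.startswith label_name "B-" then mapping.insert i "B-PER"
         else if PySem.Str.startswith label_name "I-" then mapping.insert i "I-PER"
         else mapping)
      else if PySem.Str.isIn "nam_loc" label_name then
        (if PySem.Str.startswith label_name "B-" then mapping.insert i "B-LOC"
         else if PySem.Str.startswith label_name "I-" then mapping.insert i "I-LOC"
         else mapping)
      else if PySem.Str.isIn "nam_org" label_name then
        (if PySem.Str.startswith label_name "B-" then mapping.insert i "B-ORG"
         else if PySem.Str.startswith label_name "I-" then mapping.insert i "I-ORG"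
         else mapping)
      else
        (if PySem.Str.startswith label_name "B-" then mapping.insert i "B-MISC"
         else if PySem.Str.startswith label_name "I-" then mapping.insert i "I-MISC"
         else mapping.insert i "O")) PySem.Dict.empty
  mapping.items

-- ===== PORT B =====
def pvStages : List (String × String) := [("nam_liv", "PER"), ("nam_loc", "LOC"), ("nam_org", "ORG")]

def create_label_mapping_alt (label_names : List String) : List (Int × String) :=
  let pending0 := PySem.List.enumerate label_names
  -- stage 1: the literal "O" label
  let entries0 := (pending0.filter (fun p => p.2 == "O")).map (fun p => (p.1, "O"))
  let pending1 := pending0.filter (fun p => !(p.2 == "O"))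
  -- one stage per known category, in priority order
  let st := pvStages.foldl (fun (st : List (Int × String) × List (Int × String)) ft =>
      let claimed := st.2.filter (fun p => PySem.Str.isIn ft.1 p.2)
      let pending := st.2.filter (fun p => !(PySem.Str.isIn ft.1 p.2))
      let new := (claimed.filter (fun p =>
            PySem.Str.startswith p.2 "B-" || PySem.Str.startswith p.2 "I-")).map
          (fun p => (p.1, (if PySem.Str.startswith p.2 "B-" then "B-" else "I-") ++ ft.2))
      (st.1 ++ new, pending)) (entries0, pending1)
  -- final stage: everything no category claimed
  let entries := st.1 ++ st.2.map (fun p =>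
      (p.1, if PySem.Str.startswith p.2 "B-" then "B-MISC"
            else if PySem.Str.startswith p.2 "I-" then "I-MISC" else "O"))
  ((PySem.List.sorted entries (fun e => e.1) false).foldl
      (fun d (p : Int × String) => d.insert p.1 p.2) PySem.Dict.empty).items

-- ===== PRECONDITION & SPEC =====
def Spec_create_label_mapping (label_names : List String) (out : List (Int × String)) : Prop := out = create_label_mapping_alt label_names
instance (label_names : List String) (out : List (Int × String)) : Decidable (Spec_create_label_mapping label_names out) := by unfold Spec_create_label_mapping; infer_instance

-- ===== CLAIM (what is proved, stated in full; the proofs are below) =====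
def Claim_equal_create_label_mapping : Prop := ∀ (label_names : List String), Dom_create_label_mapping label_names → Spec_create_label_mapping label_names (create_label_mapping label_names)

-- ===== LEMMAS AND PROOFS =====

-- per-name classification, shared reference point of the two proofs (used by neither port)
def pvBio (n : String) : Option String :=
  if n == "O" then some "O"
  else if PySem.Str.isIn "nam_liv" n then
    (if PySem.Str.startswith n "B-" then some "B-PER"
     else if PySem.Str.startswith n "I-" then some "I-PER" else none)
  else if PySem.Str.isIn "nam_loc" n then
    (if PySem.Str.startswith n "B-" then some "B-LOC"
     else if PySem.Str.startswith n "I-" then some "I-LOC" else none)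
  else if PySem.Str.isIn "nam_org" n then
    (if PySem.Str.startswith n "B-" then some "B-ORG"
     else if PySem.Str.startswith n "I-" then some "I-ORG" else none)
  else
    (if PySem.Str.startswith n "B-" then some "B-MISC"
     else if PySem.Str.startswith n "I-" then some "I-MISC" else some "O")

def pvBioP (p : Int × String) : Option (Int × String) := (pvBio p.2).map (fun t => (p.1, t))

-- A's loop body, factored for the proof
def pvStepA (d : PySem.Dict Int String) (p : Int × String) : PySem.Dict Int String :=
  if p.2 = "O" then d.insert p.1 "O"
  else if PySem.Str.isIn "nam_liv" p.2 then
    (if PySem.Str.startswith p.2 "B-" then d.insert p.1 "B-PER"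
     else if PySem.Str.startswith p.2 "I-" then d.insert p.1 "I-PER"
     else d)
  else if PySem.Str.isIn "nam_loc" p.2 then
    (if PySem.Str.startswith p.2 "B-" then d.insert p.1 "B-LOC"
     else if PySem.Str.startswith p.2 "I-" then d.insert p.1 "I-LOC"
     else d)
  else if PySem.Str.isIn "nam_org" p.2 then
    (if PySem.Str.startswith p.2 "B-" then d.insert p.1 "B-ORG"
     else if PySem.Str.startswith p.2 "I-" then d.insert p.1 "I-ORG"
     else d)
  else
    (if PySem.Str.startswith p.2 "B-" then d.insert p.1 "B-MISC"
     else if PySem.Str.startswith p.2 "I-" then d.insert p.1 "I-MISC"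
     else d.insert p.1 "O")

lemma pvStepA_eq_bio (d : PySem.Dict Int String) (i : Int) (name : String) :
    pvStepA d (i, name) = match pvBio name with
      | some t => d.insert i t
      | none => d := by
  unfold pvStepA pvBio
  split_ifs <;> simp_all

-- A's foldl, characterised: its items are the classified entries, in index order
lemma pvFold_items (xs : List String) (s : Int) (d : PySem.Dict Int String)
    (h : ∀ k ∈ d.keys, k < s) :
    ((PySem.List.enumerate xs s).foldl pvStepA d).items
      = d.items ++ (PySem.List.enumerate xs s).filterMap pvBioP := by
  induction xs generalizing s d with
  | nil => simp [PySem.List.enumerate_nil]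
  | cons x xs ih =>
    rw [PySem.List.enumerate_cons, List.foldl_cons, List.filterMap_cons]
    have hfresh : d.contains s = false := by
      rw [PySem.Dict.contains_eq_decide_mem_keys]
      simp only [decide_eq_false_iff_not]
      intro hmem
      exact absurd (h s hmem) (lt_irrefl s)
    cases hb : pvBio x with
    | none =>
      have hs2 : pvStepA d (s, x) = d := by rw [pvStepA_eq_bio, hb]
      have hbp : pvBioP (s, x) = none := by simp [pvBioP, hb]
      rw [hs2, hbp, ih (s + 1) d (fun k hk => lt_trans (h k hk) (by omega))]
    | some t =>
      have hs2 : pvStepA d (s, x) = d.insert s t := by rw [pvStepA_eq_bio, hb]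
      have hbp : pvBioP (s, x) = some (s, t) := by simp [pvBioP, hb]
      rw [hs2, hbp, ih (s + 1) (d.insert s t) (fun k hk => by
        rcases (PySem.Dict.mem_keys_insert _ _ _ _).mp hk with h1 | h2
        · omega
        · exact lt_trans (h k h2) (by omega)), PySem.Dict.items_insert_of_not_contains (h := hfresh)]
      simp

-- B's staged pipeline on an arbitrary worklist (the exact entries list B's stage fold produces)
def pvPipe (l : List (Int × String)) : List (Int × String) :=
  ((((l.filter (fun p => p.2 == "O")).map (fun p => (p.1, "O"))
      ++ (((l.filter (fun p => !(p.2 == "O"))).filter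
              (fun p => PySem.Str.isIn "nam_liv" p.2)).filter
            (fun p => PySem.Str.startswith p.2 "B-" || PySem.Str.startswith p.2 "I-")).map
          (fun p => (p.1, (if PySem.Str.startswith p.2 "B-" then "B-" else "I-") ++ "PER")))
    ++ ((((l.filter (fun p => !(p.2 == "O"))).filter
              (fun p => !(PySem.Str.isIn "nam_liv" p.2))).filter
              (fun p => PySem.Str.isIn "nam_loc" p.2)).filter
            (fun p => PySem.Str.startswith p.2 "B-" || PySem.Str.startswith p.2 "I-")).map
          (fun p => (p.1, (if PySem.Str.startswith p.2 "B-" then "B-" else "I-") ++ "LOC")))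
   ++ (((((l.filter (fun p => !(p.2 == "O"))).filter
              (fun p => !(PySem.Str.isIn "nam_liv" p.2))).filter
              (fun p => !(PySem.Str.isIn "nam_loc" p.2))).filter
              (fun p => PySem.Str.isIn "nam_org" p.2)).filter
            (fun p => PySem.Str.startswith p.2 "B-" || PySem.Str.startswith p.2 "I-")).map
          (fun p => (p.1, (if PySem.Str.startswith p.2 "B-" then "B-" else "I-") ++ "ORG")))
  ++ ((((l.filter (fun p => !(p.2 == "O"))).filter
              (fun p => !(PySem.Str.isIn "nam_liv" p.2))).filter
              (fun p => !(PySem.Str.isIn "nam_loc" p.2))).filter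
              (fun p => !(PySem.Str.isIn "nam_org" p.2))).map
        (fun p => (p.1, if PySem.Str.startswith p.2 "B-" then "B-MISC"
            else if PySem.Str.startswith p.2 "I-" then "I-MISC" else "O"))

lemma pvAlt_eq (xs : List String) :
    create_label_mapping_alt xs
      = ((PySem.List.sorted (pvPipe (PySem.List.enumerate xs)) (fun e => e.1) false).foldl
          (fun d (p : Int × String) => d.insert p.1 p.2) PySem.Dict.empty).items := rfl

-- the five per-stage routes, as partial classification functions
def pvG0 (p : Int × String) : Option (Int × String) :=
  if p.2 == "O" then some (p.1, "O") else none
def pvG1 (p : Int × String) : Option (Int × String) :=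
  if (PySem.Str.startswith p.2 "B-" || PySem.Str.startswith p.2 "I-")
      && (PySem.Str.isIn "nam_liv" p.2 && !(p.2 == "O"))
  then some (p.1, (if PySem.Str.startswith p.2 "B-" then "B-" else "I-") ++ "PER") else none
def pvG2 (p : Int × String) : Option (Int × String) :=
  if (PySem.Str.startswith p.2 "B-" || PySem.Str.startswith p.2 "I-")
      && (PySem.Str.isIn "nam_loc" p.2 && (!(PySem.Str.isIn "nam_liv" p.2) && !(p.2 == "O")))
  then some (p.1, (if PySem.Str.startswith p.2 "B-" then "B-" else "I-") ++ "LOC") else none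
def pvG3 (p : Int × String) : Option (Int × String) :=
  if (PySem.Str.startswith p.2 "B-" || PySem.Str.startswith p.2 "I-")
      && (PySem.Str.isIn "nam_org" p.2 && (!(PySem.Str.isIn "nam_loc" p.2)
          && (!(PySem.Str.isIn "nam_liv" p.2) && !(p.2 == "O"))))
  then some (p.1, (if PySem.Str.startswith p.2 "B-" then "B-" else "I-") ++ "ORG") else none
def pvG4 (p : Int × String) : Option (Int × String) :=
  if !(PySem.Str.isIn "nam_org" p.2) && (!(PySem.Str.isIn "nam_loc" p.2)
      && (!(PySem.Str.isIn "nam_liv" p.2) && !(p.2 == "O")))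
  then some (p.1, if PySem.Str.startswith p.2 "B-" then "B-MISC"
      else if PySem.Str.startswith p.2 "I-" then "I-MISC" else "O") else none

def pvOr {β : Type} (a b : Option β) : Option β :=
  match a with
  | some x => some x
  | none => b

lemma pvSeg {α β : Type} (q : α → Bool) (f : α → β) (l : List α) :
    (l.filter q).map f = l.filterMap (fun x => if q x then some (f x) else none) := by
  induction l with
  | nil => rfl
  | cons a l ih =>
    rw [List.filter_cons]
    by_cases h : q a <;> simp [h, ih]

lemma pvPerm2 {α β : Type} (f g : α → Option β) (hd : ∀ x, f x = none ∨ g x = none)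
    (l : List α) :
    (l.filterMap f ++ l.filterMap g).Perm (l.filterMap (fun x => pvOr (f x) (g x))) := by
  induction l with
  | nil => simp
  | cons x l ih =>
    simp only [List.filterMap_cons]
    rcases hd x with hf | hg
    · rw [hf]
      cases hg : g x with
      | none => simpa [pvOr] using ih
      | some b =>
        simp only [pvOr]
        exact List.perm_middle.trans (ih.cons b)
    · rw [hg]
      cases hf : f x with
      | none => simpa [pvOr] using ih
      | some a =>
        simp only [pvOr, List.cons_append]
        exact ih.cons a

-- the pipeline is the concatenation of the five route filterMaps
lemma pvPipe_eq (l : List (Int × String)) :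
    pvPipe l = (((l.filterMap pvG0 ++ l.filterMap pvG1) ++ l.filterMap pvG2)
        ++ l.filterMap pvG3) ++ l.filterMap pvG4 := by
  unfold pvPipe
  simp only [List.filter_filter]
  rw [pvSeg, pvSeg, pvSeg, pvSeg, pvSeg]
  rfl

-- route disjointness, stage by stage
lemma pvHd1 : ∀ p, pvG0 p = none ∨ pvG1 p = none := by
  intro p; cases hO : (p.2 == "O") <;> simp [pvG0, pvG1, hO]
lemma pvHd2 : ∀ p, pvOr (pvG0 p) (pvG1 p) = none ∨ pvG2 p = none := by
  intro p
  cases hO : (p.2 == "O") <;> cases hliv : PySem.Str.isIn "nam_liv" p.2 <;>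
    simp_all [pvG0, pvG1, pvG2, pvOr]
lemma pvHd3 : ∀ p, pvOr (pvOr (pvG0 p) (pvG1 p)) (pvG2 p) = none ∨ pvG3 p = none := by
  intro p
  cases hO : (p.2 == "O") <;> cases hliv : PySem.Str.isIn "nam_liv" p.2 <;>
    cases hloc : PySem.Str.isIn "nam_loc" p.2 <;>
    simp_all [pvG0, pvG1, pvG2, pvG3, pvOr]
lemma pvHd4 : ∀ p, pvOr (pvOr (pvOr (pvG0 p) (pvG1 p)) (pvG2 p)) (pvG3 p) = none
    ∨ pvG4 p = none := by
  intro p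
  cases hO : (p.2 == "O") <;> cases hliv : PySem.Str.isIn "nam_liv" p.2 <;>
    cases hloc : PySem.Str.isIn "nam_loc" p.2 <;> cases horg : PySem.Str.isIn "nam_org" p.2 <;>
    simp_all [pvG0, pvG1, pvG2, pvG3, pvG4, pvOr]

-- the union of the five routes is exactly the per-name classification
lemma pvOr_big : ∀ p, pvOr (pvOr (pvOr (pvOr (pvG0 p) (pvG1 p)) (pvG2 p)) (pvG3 p)) (pvG4 p)
    = pvBioP p := by
  intro p
  cases hO : (p.2 == "O") <;> cases hliv : PySem.Str.isIn "nam_liv" p.2 <;>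
    cases hloc : PySem.Str.isIn "nam_loc" p.2 <;> cases horg : PySem.Str.isIn "nam_org" p.2 <;>
    cases hB : PySem.Str.startswith p.2 "B-" <;> cases hI : PySem.Str.startswith p.2 "I-" <;>
    simp_all [pvG0, pvG1, pvG2, pvG3, pvG4, pvOr, pvBioP, pvBio]

lemma pvPipe_perm (l : List (Int × String)) : (pvPipe l).Perm (l.filterMap pvBioP) := by
  rw [pvPipe_eq]
  have h1 := pvPerm2 pvG0 pvG1 pvHd1 l
  have h2 := (h1.append_right (l.filterMap pvG2)).trans
    (pvPerm2 (fun p => pvOr (pvG0 p) (pvG1 p)) pvG2 pvHd2 l)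
  have h3 := (h2.append_right (l.filterMap pvG3)).trans
    (pvPerm2 (fun p => pvOr (pvOr (pvG0 p) (pvG1 p)) (pvG2 p)) pvG3 pvHd3 l)
  have h4 := (h3.append_right (l.filterMap pvG4)).trans
    (pvPerm2 (fun p => pvOr (pvOr (pvOr (pvG0 p) (pvG1 p)) (pvG2 p)) (pvG3 p)) pvG4 pvHd4 l)
  have hc : l.filterMap
      (fun p => pvOr (pvOr (pvOr (pvOr (pvG0 p) (pvG1 p)) (pvG2 p)) (pvG3 p)) (pvG4 p))
      = l.filterMap pvBioP := List.filterMap_congr (fun p _ => pvOr_big p)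
  exact hc ▸ h4

lemma pvTarget_pairwise (xs : List String) :
    ((PySem.List.enumerate xs).filterMap pvBioP).Pairwise (fun a b => a.1 < b.1) := by
  have h := PySem.List.pairwise_lt_enumerate (xs := xs) (s := 0)
  rw [List.pairwise_filterMap]
  refine h.imp_of_mem ?_
  intro a b _ _ hab x hx y hy
  simp only [pvBioP] at hx hy
  rcases Option.map_eq_some_iff.mp hx with ⟨t, _, rfl⟩
  rcases Option.map_eq_some_iff.mp hy with ⟨u, _, rfl⟩
  exact hab

-- rebuilding a dict from entries with strictly increasing fresh keys
lemma pvBuild (l : List (Int × String)) (d : PySem.Dict Int String)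
    (hfresh : ∀ k ∈ d.keys, ∀ p ∈ l, k < p.1)
    (hl : l.Pairwise (fun a b => a.1 < b.1)) :
    (l.foldl (fun d (p : Int × String) => d.insert p.1 p.2) d).items = d.items ++ l := by
  induction l generalizing d with
  | nil => simp
  | cons p l ih =>
    simp only [List.foldl_cons]
    have hnotc : d.contains p.1 = false := by
      rw [PySem.Dict.contains_eq_decide_mem_keys]
      simp only [decide_eq_false_iff_not]
      intro hmem
      exact absurd (hfresh p.1 hmem p (by simp)) (lt_irrefl _)
    rw [ih (d.insert p.1 p.2) (fun k hk q hq => by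
        rcases (PySem.Dict.mem_keys_insert _ _ _ _).mp hk with h1 | h2
        · subst h1; exact (List.pairwise_cons.mp hl).1 q hq
        · exact hfresh k h2 q (List.mem_cons_of_mem _ hq)) (List.pairwise_cons.mp hl).2]
    rw [PySem.Dict.items_insert_of_not_contains (h := hnotc)]
    simp

-- ===== VERDICT (by name: the statement is the Claim_ definition above) =====
theorem create_label_mapping_spec : Claim_equal_create_label_mapping := by
  intro label_names _
  unfold Spec_create_label_mapping
  have hA : create_label_mapping label_names
      = (PySem.List.enumerate label_names).filterMap pvBioP := by
    unfold create_label_mapping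
    have hfun : (fun (mapping : PySem.Dict Int String) (p : Int × String) =>
        if p.2 = "O" then mapping.insert p.1 "O"
        else if PySem.Str.isIn "nam_liv" p.2 then
          (if PySem.Str.startswith p.2 "B-" then mapping.insert p.1 "B-PER"
           else if PySem.Str.startswith p.2 "I-" then mapping.insert p.1 "I-PER"
           else mapping)
        else if PySem.Str.isIn "nam_loc" p.2 then
          (if PySem.Str.startswith p.2 "B-" then mapping.insert p.1 "B-LOC"
           else if PySem.Str.startswith p.2 "I-" then mapping.insert p.1 "I-LOC"
           else mapping)
        else if PySem.Str.isIn "nam_org" p.2 then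
          (if PySem.Str.startswith p.2 "B-" then mapping.insert p.1 "B-ORG"
           else if PySem.Str.startswith p.2 "I-" then mapping.insert p.1 "I-ORG"
           else mapping)
        else
          (if PySem.Str.startswith p.2 "B-" then mapping.insert p.1 "B-MISC"
           else if PySem.Str.startswith p.2 "I-" then mapping.insert p.1 "I-MISC"
           else mapping.insert p.1 "O")) = pvStepA := rfl
    rw [hfun, pvFold_items label_names 0 PySem.Dict.empty (by simp [PySem.Dict.keys_empty])]
    simp [PySem.Dict.empty]
  have hsorted :
      PySem.List.sorted (pvPipe (PySem.List.enumerate label_names)) (fun e => e.1) false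
        = (PySem.List.enumerate label_names).filterMap pvBioP :=
    PySem.List.sorted_eq_of_perm_of_pairwise_lt _ _ _
      (pvPipe_perm (PySem.List.enumerate label_names)).symm
      (pvTarget_pairwise label_names)
  have hB : create_label_mapping_alt label_names
      = (PySem.List.enumerate label_names).filterMap pvBioP := by
    rw [pvAlt_eq, hsorted,
      pvBuild _ PySem.Dict.empty (by simp [PySem.Dict.keys_empty]) (pvTarget_pairwise label_names)]
    simp [PySem.Dict.empty]
  rw [hA, hB]
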